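-- pv_equiv track=rewrite | github.com/kaushani0416/assignment-2 | tran.py | count_transitions_transversions
-- ===== SOURCE A (Python) =====
-- def count_transitions_transversions(s1, s2):
--     """Counts the number of transitions and transversions between two DNA strings."""
--     transitions = 0
--     transversions = 0
--
--     for a, b in zip(s1, s2):
--         if a != b:  # Mismatch
--             if (a, b) in [("A", "G"), ("G", "A"), ("C", "T"), ("T", "C")]:
--                 transitions += 1
--             else:
--                 transversions += 1
--
--     return transitions, transversions
-- ===== SOURCE B (Python) =====
-- def count_transitions_transversions(s1, s2):
--     """Aggregates the aligned columns into a pair-frequency table first;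
--     transitions are then read off by four O(1) lookups of the transition
--     pairs, and transversions are the remaining mismatched mass."""
--     freq = {}
--     for pair in zip(s1, s2):
--         freq[pair] = freq.get(pair, 0) + 1
--     transitions = (freq.get(("A", "G"), 0) + freq.get(("G", "A"), 0)
--                    + freq.get(("C", "T"), 0) + freq.get(("T", "C"), 0))
--     mismatches = sum(n for (a, b), n in freq.items() if a != b)
--     return transitions, mismatches - transitions
-- ===== Notes on version B (the rewrite author's own statement) =====
-- stated objective: alternative
-- what changed: Instead of classifying every aligned position inside the accumulator loop, B aggregates the zipped columns into a pair-frequency dictionary in one pass and then classifies distinct pairs only: transitions are four O(1) lookups of the transition pairs and transversions are the remaining mismatched mass (mismatch-weight sum minus transitions).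
import Mathlib
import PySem

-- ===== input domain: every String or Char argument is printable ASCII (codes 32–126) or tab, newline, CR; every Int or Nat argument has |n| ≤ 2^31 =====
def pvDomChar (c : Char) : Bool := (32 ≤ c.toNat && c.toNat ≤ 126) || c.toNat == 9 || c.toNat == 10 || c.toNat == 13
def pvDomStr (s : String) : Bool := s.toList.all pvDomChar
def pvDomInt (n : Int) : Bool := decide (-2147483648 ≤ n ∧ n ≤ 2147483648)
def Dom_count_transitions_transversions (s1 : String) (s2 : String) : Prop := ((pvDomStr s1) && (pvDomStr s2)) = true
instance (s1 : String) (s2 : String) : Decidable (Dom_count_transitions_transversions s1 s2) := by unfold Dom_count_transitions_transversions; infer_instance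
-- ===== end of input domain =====

-- B replaces A's per-position classification loop by a pair-frequency dictionary built in
-- one pass, reading transitions off with four lookups of the transition pairs
-- (objective: alternative).

-- ===== PORT A =====
-- A's loop over zip(s1,s2) with two running counters and the four-pair membership test.
def ctvLoopA : List (Char × Char) → Int → Int → Int × Int
  | [], t, v => (t, v)
  | (a, b) :: rest, t, v =>
    if a ≠ b then
      if (a, b) = ('A', 'G') ∨ (a, b) = ('G', 'A') ∨ (a, b) = ('C', 'T') ∨ (a, b) = ('T', 'C') then
        ctvLoopA rest (t + 1) v
      else
        ctvLoopA rest t (v + 1)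
    else
      ctvLoopA rest t v

def count_transitions_transversions (s1 : String) (s2 : String) : Int × Int :=
  ctvLoopA (s1.toList.zip s2.toList) 0 0

-- ===== PORT B =====
-- B: build the pair-frequency dict (freq[pair] = freq.get(pair, 0) + 1), then four
-- lookups give the transitions and the mismatched entries' total gives the mismatches.
def count_transitions_transversions_alt (s1 : String) (s2 : String) : Int × Int :=
  let freq := (s1.toList.zip s2.toList).foldl
      (fun d p => d.insert p (d.getD p 0 + 1)) PySem.Dict.empty
  let transitions := freq.getD ('A', 'G') 0 + freq.getD ('G', 'A') 0
      + freq.getD ('C', 'T') 0 + freq.getD ('T', 'C') 0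
  let mismatches := ((freq.items.filter (fun kv => kv.1.1 ≠ kv.1.2)).map (·.2)).sum
  (transitions, mismatches - transitions)

-- ===== PRECONDITION & SPEC =====
def Spec_count_transitions_transversions (s1 : String) (s2 : String) (out : Int × Int) : Prop := out = count_transitions_transversions_alt s1 s2
instance (s1 : String) (s2 : String) (out : Int × Int) : Decidable (Spec_count_transitions_transversions s1 s2 out) := by unfold Spec_count_transitions_transversions; infer_instance

-- ===== CLAIM (what is proved, stated in full; the proofs are below) =====
def Claim_equal_count_transitions_transversions : Prop := ∀ (s1 : String) (s2 : String), Dom_count_transitions_transversions s1 s2 → Spec_count_transitions_transversions s1 s2 (count_transitions_transversions s1 s2)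

-- ===== LEMMAS AND PROOFS =====

-- the four transition pairs, as a Boolean predicate
def transP (p : Char × Char) : Bool :=
  p = ('A', 'G') || p = ('G', 'A') || p = ('C', 'T') || p = ('T', 'C')

lemma transP_refl (a : Char) : transP (a, a) = false := by
  simp only [transP, Prod.mk.injEq, Bool.or_eq_false_iff, decide_eq_false_iff_not, not_and]
  refine ⟨⟨⟨?_, ?_⟩, ?_⟩, ?_⟩ <;> rintro rfl <;> decide

-- A's loop is the pair of countP's of the transition / mismatched-non-transition predicates
lemma ctvLoopA_eq (l : List (Char × Char)) : ∀ (t v : Int),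
    ctvLoopA l t v =
      (t + (l.countP transP : Nat),
       v + (l.countP (fun p => p.1 ≠ p.2 && !transP p) : Nat)) := by
  induction l with
  | nil => intro t v; simp [ctvLoopA]
  | cons p rest ih =>
    intro t v
    obtain ⟨a, b⟩ := p
    by_cases hab : a = b
    · subst hab
      simp [ctvLoopA, ih, transP_refl]
    · by_cases hmem : (a, b) = ('A', 'G') ∨ (a, b) = ('G', 'A') ∨ (a, b) = ('C', 'T') ∨ (a, b) = ('T', 'C')
      · have htr : transP (a, b) = true := by
          simp only [transP, Bool.or_eq_true, decide_eq_true_eq]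
          tauto
        simp only [ctvLoopA, if_pos hab, if_pos hmem, ih]
        simp [htr, hab]
        omega
      · have htr : transP (a, b) = false := by
          simp only [transP, Bool.or_eq_false_iff, decide_eq_false_iff_not]
          tauto
        simp only [ctvLoopA, if_pos hab, if_neg hmem, ih]
        simp [htr, hab]
        omega

-- per-element: the four equality indicators sum to the transP indicator
lemma ind4 (a b : Char) :
    ((if ((a,b) : Char × Char) == ('A','G') then (1:Nat) else 0)
      + (if ((a,b) : Char × Char) == ('G','A') then 1 else 0)
      + (if ((a,b) : Char × Char) == ('C','T') then 1 else 0)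
      + (if ((a,b) : Char × Char) == ('T','C') then 1 else 0))
    = if transP (a,b) then 1 else 0 := by
  by_cases h1 : ((a,b) : Char × Char) = ('A','G')
  · injection h1 with ha hb; subst ha; subst hb; decide
  by_cases h2 : ((a,b) : Char × Char) = ('G','A')
  · injection h2 with ha hb; subst ha; subst hb; decide
  by_cases h3 : ((a,b) : Char × Char) = ('C','T')
  · injection h3 with ha hb; subst ha; subst hb; decide
  by_cases h4 : ((a,b) : Char × Char) = ('T','C')
  · injection h4 with ha hb; subst ha; subst hb; decide
  · have ht : transP (a,b) = false := by
      simp only [transP, Bool.or_eq_false_iff, decide_eq_false_iff_not]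
      exact ⟨⟨⟨h1, h2⟩, h3⟩, h4⟩
    simp [beq_iff_eq, h1, h2, h3, h4, ht]

-- B's four lookups equal the countP of the transition predicate
lemma count_four_eq_countP (l : List (Char × Char)) :
    l.count ('A', 'G') + l.count ('G', 'A') + l.count ('C', 'T') + l.count ('T', 'C')
      = l.countP transP := by
  induction l with
  | nil => simp
  | cons p rest ih =>
    rcases p with ⟨a, b⟩
    simp only [List.count_cons, List.countP_cons]
    have h := ind4 a b
    omega

lemma sum_indicator (l : List (Char × Char)) (x : Char × Char) :
    (l.map (fun k => if x = k then (1:Nat) else 0)).sum = l.count x := by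
  induction l with
  | nil => simp
  | cons y l ih =>
    simp only [List.map_cons, List.sum_cons, List.count_cons, ih]
    by_cases h : x = y
    · subst h; simp; omega
    · have hb : (y == x) = false := beq_eq_false_iff_ne.mpr (Ne.symm h)
      simp [h, hb]

lemma sum_map_add_nat (l : List (Char × Char)) (f g : Char × Char → Nat) :
    (l.map (fun k => f k + g k)).sum = (l.map f).sum + (l.map g).sum := by
  induction l with
  | nil => simp
  | cons y l ih => simp [ih]; omega

-- summing xs-multiplicities over the q-part of a nodup key list covering xs counts q in xs
lemma sum_counts_filter (L : List (Char × Char)) (q : Char × Char → Bool) :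
    ∀ (xs : List (Char × Char)), L.Nodup → (∀ x ∈ xs, x ∈ L) →
      ((L.filter q).map (fun k => xs.count k)).sum = xs.countP q := by
  intro xs hnd
  induction xs with
  | nil => intro _; simp
  | cons x xs ih =>
    intro hcov
    have hx : x ∈ L := hcov x (by simp)
    have hcov' : ∀ y ∈ xs, y ∈ L := fun y hy => hcov y (by simp [hy])
    have hmap : (L.filter q).map (fun k => (x :: xs).count k)
        = (L.filter q).map (fun k => xs.count k + (if x = k then 1 else 0)) := by
      refine List.map_congr_left ?_
      intro k _
      simp only [List.count_cons, beq_iff_eq]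
    rw [hmap, sum_map_add_nat, ih hcov']
    have hone : ((L.filter q).map (fun k => if x = k then (1:Nat) else 0)).sum
        = if q x then 1 else 0 := by
      rw [sum_indicator]
      by_cases hq : q x = true
      · have hmem : x ∈ L.filter q := List.mem_filter.mpr ⟨hx, hq⟩
        have hnodup : (L.filter q).Nodup := hnd.filter _
        simp [List.count_eq_one_of_mem hnodup hmem, hq]
      · have hnm : x ∉ L.filter q := fun hc => hq (List.of_mem_filter hc)
        simp [List.count_eq_zero.mpr hnm, hq]
    rw [hone]
    simp [List.countP_cons]
-- the mismatch count splits into transitions and the rest (transition pairs mismatch)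
lemma countP_mism_split (l : List (Char × Char)) :
    l.countP (fun p => p.1 ≠ p.2)
      = l.countP transP + l.countP (fun p => p.1 ≠ p.2 && !transP p) := by
  induction l with
  | nil => simp
  | cons p rest ih =>
    have htmm : transP p = true → p.1 ≠ p.2 := by
      rcases p with ⟨a, b⟩
      simp only [transP, Bool.or_eq_true, decide_eq_true_eq, Prod.mk.injEq]
      rintro (((⟨rfl, rfl⟩ | ⟨rfl, rfl⟩) | ⟨rfl, rfl⟩) | ⟨rfl, rfl⟩) <;> decide
    simp only [List.countP_cons, ih]
    by_cases ht : transP p = true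
    · have hm := htmm ht
      simp [ht, hm]
      omega
    · simp only [Bool.not_eq_true] at ht
      by_cases hm : p.1 = p.2 <;> simp [ht, hm] <;> omega

-- ===== VERDICT (by name: the statement is the Claim_ definition above) =====
theorem count_transitions_transversions_spec : Claim_equal_count_transitions_transversions := by
  intro s1 s2 _
  unfold Spec_count_transitions_transversions count_transitions_transversions
    count_transitions_transversions_alt
  dsimp only
  rw [ctvLoopA_eq]
  rw [PySem.Dict.foldl_insert_getD_add_one_eq_counter]
  rw [PySem.Dict.getD_counter, PySem.Dict.getD_counter, PySem.Dict.getD_counter,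
    PySem.Dict.getD_counter]
  rw [PySem.Dict.items_counter]
  rw [List.filter_map, List.map_map]
  simp only [Function.comp_def]
  have hcast : (((PySem.Set.ofList (s1.toList.zip s2.toList)).filter
          (fun k => decide (k.1 ≠ k.2))).map
          (fun k => ((s1.toList.zip s2.toList).count k : Int))).sum
      = ((((PySem.Set.ofList (s1.toList.zip s2.toList)).filter
          (fun k => decide (k.1 ≠ k.2))).map
          (fun k => (s1.toList.zip s2.toList).count k)).sum : Nat) := by
    rw [Nat.cast_list_sum, List.map_map]
    rfl
  rw [hcast]
  rw [sum_counts_filter (PySem.Set.ofList (s1.toList.zip s2.toList))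
    (fun k => decide (k.1 ≠ k.2)) (s1.toList.zip s2.toList)
    (PySem.Set.nodup_ofList _)
    (fun x hx => (PySem.Set.mem_ofList _ _).mpr hx)]
  have hfour := count_four_eq_countP (s1.toList.zip s2.toList)
  have hsplit := countP_mism_split (s1.toList.zip s2.toList)
  rw [Prod.mk.injEq]
  refine ⟨?_, ?_⟩ <;> omega
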